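-- pv_equiv track=rewrite | github.com/icspero/2-semester-Lab6 | Python/task#2.py | mix_single_column
-- ===== SOURCE A (Python) =====
-- from typing import List, Tuple
--
-- def mix_single_column(r: List[int]) -> List[int]:
--     a = r.copy()
--     b = [0] * 4
--
--     # Умножение на 2 в поле GF(2^8)
--     for c in range(4):
--         h = (r[c] >> 7) & 1
--         b[c] = (r[c] << 1) & 0xFF
--         b[c] ^= 0x1B * h
--
--     # Умножение столбца на матрицу
--     r[0] = b[0] ^ a[3] ^ a[2] ^ b[1] ^ a[1]
--     r[1] = b[1] ^ a[0] ^ a[3] ^ b[2] ^ a[2]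
--     r[2] = b[2] ^ a[1] ^ a[0] ^ b[3] ^ a[3]
--     r[3] = b[3] ^ a[2] ^ a[1] ^ b[0] ^ a[0]
--
--     return r
-- ===== SOURCE B (Python) =====
-- def xtime(x):
--     return ((x << 1) & 0xFF) ^ (0x1B if (x >> 7) & 1 else 0)
--
--
-- def mix_single_column(r):
--     a = r.copy()
--     t = a[0] ^ a[1] ^ a[2] ^ a[3]
--     for i in range(4):
--         r[i] = a[i] ^ t ^ xtime(a[i] ^ a[(i + 1) % 4])
--     return r
-- ===== Notes on version B (the rewrite author's own statement) =====
-- stated objective: idiomatic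
-- what changed: Replaces the explicit doubled array b and four hand-written matrix rows by the classic compact MixColumns form: compute the global column xor t once and set r[i] = a[i] ^ t ^ xtime(a[i] ^ a[(i+1)%4]) in a single loop, relying on GF(2)-linearity of xtime.
import Mathlib
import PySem

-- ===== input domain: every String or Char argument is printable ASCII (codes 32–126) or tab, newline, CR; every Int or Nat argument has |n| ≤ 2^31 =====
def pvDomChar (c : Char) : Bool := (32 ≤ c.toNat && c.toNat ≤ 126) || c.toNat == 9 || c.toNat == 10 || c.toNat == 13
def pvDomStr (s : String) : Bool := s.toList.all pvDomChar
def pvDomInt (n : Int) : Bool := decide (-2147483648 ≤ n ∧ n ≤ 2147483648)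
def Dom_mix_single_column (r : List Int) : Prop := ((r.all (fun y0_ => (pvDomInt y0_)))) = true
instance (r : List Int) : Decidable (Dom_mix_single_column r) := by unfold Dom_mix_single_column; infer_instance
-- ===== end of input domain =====

-- B replaces A's explicit doubled-array b and four hand-written matrix rows by the classic
-- compact AES MixColumns form (global column xor t plus xtime of neighbour xors), relying on
-- GF(2)-linearity of xtime; both A and B mutate r in place in Python — the equivalence proved
-- here is about the RETURN value only (the in-place effect happens to be the same).


-- ===== PORT A =====
-- pyGetD is exact here: under Pre_ (length ≥ 4) every index 0..3 is in range, so Python never raises.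
def mix_single_column (r : List Int) : List Int :=
  let a := r
  let b : List Int :=
    (PySem.List.pyRange 0 4 1).foldl (fun b c =>
      let h := PySem.Int.band ((PySem.List.pyGetD r c 0) >>> (7 : Nat)) 1
      let v := PySem.Int.band ((PySem.List.pyGetD r c 0) <<< (1 : Nat)) 255
      b.set c.toNat (PySem.Int.bxor v (27 * h))) [0, 0, 0, 0]
  let r0 := r.set 0 (PySem.Int.bxor (PySem.Int.bxor (PySem.Int.bxor (PySem.Int.bxor
      (PySem.List.pyGetD b 0 0) (PySem.List.pyGetD a 3 0)) (PySem.List.pyGetD a 2 0))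
      (PySem.List.pyGetD b 1 0)) (PySem.List.pyGetD a 1 0))
  let r1 := r0.set 1 (PySem.Int.bxor (PySem.Int.bxor (PySem.Int.bxor (PySem.Int.bxor
      (PySem.List.pyGetD b 1 0) (PySem.List.pyGetD a 0 0)) (PySem.List.pyGetD a 3 0))
      (PySem.List.pyGetD b 2 0)) (PySem.List.pyGetD a 2 0))
  let r2 := r1.set 2 (PySem.Int.bxor (PySem.Int.bxor (PySem.Int.bxor (PySem.Int.bxor
      (PySem.List.pyGetD b 2 0) (PySem.List.pyGetD a 1 0)) (PySem.List.pyGetD a 0 0))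
      (PySem.List.pyGetD b 3 0)) (PySem.List.pyGetD a 3 0))
  let r3 := r2.set 3 (PySem.Int.bxor (PySem.Int.bxor (PySem.Int.bxor (PySem.Int.bxor
      (PySem.List.pyGetD b 3 0) (PySem.List.pyGetD a 2 0)) (PySem.List.pyGetD a 1 0))
      (PySem.List.pyGetD b 0 0)) (PySem.List.pyGetD a 0 0))
  r3

-- ===== PORT B =====
def pyxtime (x : Int) : Int :=
  PySem.Int.bxor (PySem.Int.band (x <<< (1 : Nat)) 255)
    (if PySem.Int.band (x >>> (7 : Nat)) 1 ≠ 0 then 27 else 0)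

def mix_single_column_alt (r : List Int) : List Int :=
  let a := r
  let t := PySem.Int.bxor (PySem.Int.bxor (PySem.Int.bxor
      (PySem.List.pyGetD a 0 0) (PySem.List.pyGetD a 1 0)) (PySem.List.pyGetD a 2 0))
      (PySem.List.pyGetD a 3 0)
  (PySem.List.pyRange 0 4 1).foldl (fun s i =>
    s.set i.toNat (PySem.Int.bxor (PySem.Int.bxor (PySem.List.pyGetD a i 0) t)
      (pyxtime (PySem.Int.bxor (PySem.List.pyGetD a i 0)
        (PySem.List.pyGetD a (PySem.Int.mod (i + 1) 4) 0))))) r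

-- ===== PRECONDITION & SPEC =====
-- Pre_ excludes exactly the lists of fewer than 4 elements, on which Python A raises IndexError.
def Pre_mix_single_column (r : List Int) : Prop := 4 ≤ r.length
instance (r : List Int) : Decidable (Pre_mix_single_column r) := by
  unfold Pre_mix_single_column; infer_instance

def pvWitness_mix_single_column : List Int := [219, 19, 83, 69]

def Spec_mix_single_column (r : List Int) (out : List Int) : Prop := out = mix_single_column_alt r
instance (r : List Int) (out : List Int) : Decidable (Spec_mix_single_column r out) := by
  unfold Spec_mix_single_column; infer_instance

-- ===== CLAIM (what is proved, stated in full; the proofs are below) =====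
def Claim_equal_mix_single_column : Prop := ∀ (r : List Int), Dom_mix_single_column r →
  Pre_mix_single_column r → Spec_mix_single_column r (mix_single_column r)

-- ===== LEMMAS AND PROOFS =====
theorem pvTb255 (k : Nat) : Nat.testBit 255 k = decide (k < 8) := by
  have : (255 : Nat) = 2 ^ 8 - 1 := by norm_num
  rw [this, Nat.testBit_two_pow_sub_one]

set_option maxRecDepth 8192 in
theorem pvSub255 (u : Nat) (h : u ≤ 255) : 255 - u = 255 ^^^ u := by
  revert h; revert u; decide

theorem pvTbBand255 (a : Int) (k : Nat) :
    (PySem.Int.band a 255).testBit k = (decide (k < 8) && a.testBit k) := by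
  cases a with
  | ofNat m =>
    have h1 : PySem.Int.band (Int.ofNat m) 255 = Int.ofNat (m &&& 255) := by
      simp [PySem.Int.band]
    rw [h1]
    simp [Int.testBit, Nat.testBit_and, pvTb255, Bool.and_comm]
  | negSucc m =>
    have harg : (-(Int.negSucc m) - 1).toNat = m := by
      simp [Int.negSucc_eq]
    have h1 : PySem.Int.band (Int.negSucc m) 255 = Int.ofNat (255 - (255 &&& m)) := by
      unfold PySem.Int.band
      rw [if_neg (by simp [Int.negSucc_eq]; omega), if_pos (by norm_num), harg]
      rw [show Int.toNat 255 = 255 from rfl]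
      rfl
    rw [h1, pvSub255 _ Nat.and_le_left]
    simp [Int.testBit, Nat.testBit_xor, Nat.testBit_and, pvTb255]
    cases hd : decide (k < 8) <;> cases m.testBit k <;> simp

theorem pvNatTb7 (m : Nat) : Nat.testBit m 7 = decide ((m >>> 7) % 2 = 1) := by
  unfold Nat.testBit
  rw [Nat.and_comm, Nat.and_one_is_mod]
  rcases Nat.mod_two_eq_zero_or_one (m >>> 7) with h | h <;> simp [h]

theorem pvHbit7 (x : Int) :
    PySem.Int.band (x >>> (7 : Nat)) 1 = cond (x.testBit 7) 1 0 := by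
  rw [PySem.Int.band_one, PySem.Int.mod_eq_emod_of_pos (by norm_num)]
  cases x with
  | ofNat m =>
    have h1 : (Int.ofNat m) >>> (7 : Nat) = Int.ofNat (m >>> 7) := rfl
    have h3 : Int.testBit (Int.ofNat m) 7 = m.testBit 7 := rfl
    rw [h1, h3, pvNatTb7]
    generalize m >>> 7 = q
    rcases Nat.mod_two_eq_zero_or_one q with h | h <;> simp [h] <;> omega
  | negSucc m =>
    have h1 : (Int.negSucc m) >>> (7 : Nat) = Int.negSucc (m >>> 7) := rfl
    have h3 : Int.testBit (Int.negSucc m) 7 = !(m.testBit 7) := rfl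
    rw [h1, h3, pvNatTb7]
    generalize m >>> 7 = q
    rcases Nat.mod_two_eq_zero_or_one q with h | h <;> simp [h] <;> omega

theorem pvTbBxor (a b : Int) (k : Nat) :
    (PySem.Int.bxor a b).testBit k = ((a.testBit k) ^^ (b.testBit k)) := by
  cases a with
  | ofNat m =>
    cases b with
    | ofNat n =>
      simp [PySem.Int.bxor, Int.testBit, Nat.testBit_xor]
    | negSucc n =>
      have h1 : PySem.Int.bxor (Int.ofNat m) (Int.negSucc n) = Int.negSucc (m ^^^ n) := by
        simp [PySem.Int.bxor, Int.negSucc_eq]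
        rw [if_neg (by omega)]
        omega
      rw [h1]
      simp [Int.testBit, Nat.testBit_xor]
  | negSucc m =>
    cases b with
    | ofNat n =>
      have h1 : PySem.Int.bxor (Int.negSucc m) (Int.ofNat n) = Int.negSucc (m ^^^ n) := by
        simp [PySem.Int.bxor, Int.negSucc_eq]
        rw [if_neg (by omega)]
        omega
      rw [h1]
      simp [Int.testBit, Nat.testBit_xor]
    | negSucc n =>
      have h1 : PySem.Int.bxor (Int.negSucc m) (Int.negSucc n) = Int.ofNat (m ^^^ n) := by
        simp [PySem.Int.bxor, Int.negSucc_eq]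
        rw [if_neg (by omega), if_neg (by omega)]
      rw [h1]
      simp [Int.testBit, Nat.testBit_xor]

theorem pvTbShl1 (x : Int) (k : Nat) :
    (x <<< (1 : Nat)).testBit k = (decide (1 ≤ k) && x.testBit (k - 1)) := by
  cases x with
  | ofNat m =>
    have h1 : (Int.ofNat m) <<< (1 : Nat) = Int.ofNat (m <<< 1) := rfl
    rw [h1]
    simp [Int.testBit, Nat.testBit_shiftLeft]
  | negSucc m =>
    have h1 : (Int.negSucc m) <<< (1 : Nat) = Int.negSucc (2 * m + 1) := by
      show Int.negSucc ((m + 1) <<< 1 - 1) = _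
      rw [Nat.shiftLeft_eq]
      congr 1
      omega
    rw [h1]
    cases k with
    | zero => simp [Int.testBit, Nat.testBit]
    | succ j =>
      simp [Int.testBit, Nat.testBit_add_one]
      congr 2
      omega

theorem pvMul27 (b : Bool) : (27 : Int) * cond b 1 0 = cond b 27 0 := by
  cases b <;> norm_num

theorem pvIf27 (b : Bool) :
    (if cond b (1 : Int) 0 ≠ 0 then (27 : Int) else 0) = cond b 27 0 := by
  cases b <;> norm_num

theorem pvTbCond27 (b : Bool) (k : Nat) :
    (cond b (27 : Int) 0).testBit k = (b && Nat.testBit 27 k) := by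
  cases b <;> simp [Int.testBit]

theorem pvIntExt {a b : Int} (h : ∀ k, a.testBit k = b.testBit k) : a = b := by
  cases a with
  | ofNat m =>
    cases b with
    | ofNat n =>
      congr 1
      apply Nat.eq_of_testBit_eq
      intro i; simpa [Int.testBit] using h i
    | negSucc n =>
      exfalso
      have hk := h (m + n)
      have hm : m < 2 ^ (m + n) :=
        lt_of_le_of_lt (Nat.le_add_right m n) Nat.lt_two_pow_self
      have hn : n < 2 ^ (m + n) :=
        lt_of_le_of_lt (Nat.le_add_left n m) Nat.lt_two_pow_self
      simp [Int.testBit, Nat.testBit_lt_two_pow hm, Nat.testBit_lt_two_pow hn] at hk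
  | negSucc m =>
    cases b with
    | ofNat n =>
      exfalso
      have hk := h (m + n)
      have hm : m < 2 ^ (m + n) :=
        lt_of_le_of_lt (Nat.le_add_right m n) Nat.lt_two_pow_self
      have hn : n < 2 ^ (m + n) :=
        lt_of_le_of_lt (Nat.le_add_left n m) Nat.lt_two_pow_self
      simp [Int.testBit, Nat.testBit_lt_two_pow hm, Nat.testBit_lt_two_pow hn] at hk
    | negSucc n =>
      congr 1
      apply Nat.eq_of_testBit_eq
      intro i
      simpa [Int.testBit] using h i


theorem pvComp (x y z w T : Int)
    (hT : ∀ k, T.testBit k = (((x.testBit k ^^ y.testBit k) ^^ z.testBit k) ^^ w.testBit k)) :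
    PySem.Int.bxor (PySem.Int.bxor (PySem.Int.bxor (PySem.Int.bxor
        (PySem.Int.bxor (PySem.Int.band (x <<< (1 : Nat)) 255)
          (27 * PySem.Int.band (x >>> (7 : Nat)) 1)) w) z)
        (PySem.Int.bxor (PySem.Int.band (y <<< (1 : Nat)) 255)
          (27 * PySem.Int.band (y >>> (7 : Nat)) 1))) y
      = PySem.Int.bxor (PySem.Int.bxor x T) (pyxtime (PySem.Int.bxor x y)) := by
  simp only [pyxtime, pvHbit7, pvMul27, pvIf27]
  apply pvIntExt
  intro k
  simp only [pvTbBxor, pvTbBand255, pvTbShl1, pvTbCond27, hT]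
  generalize x.testBit k = px
  generalize y.testBit k = py
  generalize z.testBit k = pz
  generalize w.testBit k = pw
  generalize x.testBit (k - 1) = qx
  generalize y.testBit (k - 1) = qy
  generalize x.testBit 7 = sx
  generalize y.testBit 7 = sy
  generalize Nat.testBit 27 k = c
  generalize decide (k < 8) = d2
  generalize decide (1 ≤ k) = d1
  revert px py pz pw qx qy sx sy c d2 d1
  decide

-- ===== VERDICT (by name: the statement is the Claim_ definition above) =====
theorem mix_single_column_spec : Claim_equal_mix_single_column := by
  intro r _ hpre
  unfold Pre_mix_single_column at hpre
  obtain ⟨a0, a1, a2, a3, rest, rfl⟩ :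
      ∃ a0 a1 a2 a3 rest, r = a0 :: a1 :: a2 :: a3 :: rest := by
    match r, hpre with
    | a0 :: a1 :: a2 :: a3 :: rest, _ => exact ⟨a0, a1, a2, a3, rest, rfl⟩
  unfold Spec_mix_single_column mix_single_column mix_single_column_alt
  rw [show PySem.List.pyRange 0 4 1 = [0, 1, 2, 3] from by decide]
  simp only [List.foldl, PySem.List.pyGetD_ofNat',
    show PySem.Int.mod (0 + 1) 4 = 1 from by decide,
    show PySem.Int.mod (1 + 1) 4 = 2 from by decide,
    show PySem.Int.mod (2 + 1) 4 = 3 from by decide,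
    show PySem.Int.mod (3 + 1) 4 = 0 from by decide,
    show ((0 : Int)).toNat = 0 from rfl, show ((1 : Int)).toNat = 1 from rfl,
    show ((2 : Int)).toNat = 2 from rfl, show ((3 : Int)).toNat = 3 from rfl,
    List.set, List.getD, List.getElem?_cons_zero, List.getElem?_cons_succ, Option.getD_some]
  simp only [List.cons.injEq]
  refine ⟨?_, ?_, ?_, ?_, trivial⟩
  · exact pvComp a0 a1 a2 a3 _ (by intro k; simp only [pvTbBxor])
  · exact pvComp a1 a2 a3 a0 _ (by
      intro k; simp only [pvTbBxor]
      cases a0.testBit k <;> cases a1.testBit k <;> cases a2.testBit k <;> cases a3.testBit k <;> rfl)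
  · exact pvComp a2 a3 a0 a1 _ (by
      intro k; simp only [pvTbBxor]
      cases a0.testBit k <;> cases a1.testBit k <;> cases a2.testBit k <;> cases a3.testBit k <;> rfl)
  · exact pvComp a3 a0 a1 a2 _ (by
      intro k; simp only [pvTbBxor]
      cases a0.testBit k <;> cases a1.testBit k <;> cases a2.testBit k <;> cases a3.testBit k <;> rfl)
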